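-- pv_equiv track=rewrite | github.com/IC-3002/ic-3002-2020ii-tc9-ealpizarp | almacenamiento.py | maximizar
-- ===== SOURCE A (Python) =====
-- def maximizar(As, D):
--     archivos_asc = sorted(As, key=lambda tup: tup[1])
--     res = []
--     current_storage = 0
--     for _file in archivos_asc:
--         if (_file[1] + current_storage) < D:
--             res.append(_file)
--             current_storage += _file[1]
--         else:
--             break
--     return res
-- ===== SOURCE B (Python) =====
-- def maximizar(As, D):
--     srt = sorted(As, key=lambda t: t[1])
--     # prefix-sum table of the sorted sizes
--     pref = []
--     s = 0
--     for _, size in srt: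
--         s += size
--         pref.append(s)
--     # first index whose prefix sum reaches D; keep everything before it
--     k = next((i for i, p in enumerate(pref) if p >= D), len(srt))
--     return srt[:k]
-- ===== Notes on version B (the rewrite author's own statement) =====
-- stated objective: alternative
-- what changed: Replaces the running-accumulator-with-break loop by a precomputed prefix-sum table, a first-index-reaching-D search, and a single slice.
import Mathlib
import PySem

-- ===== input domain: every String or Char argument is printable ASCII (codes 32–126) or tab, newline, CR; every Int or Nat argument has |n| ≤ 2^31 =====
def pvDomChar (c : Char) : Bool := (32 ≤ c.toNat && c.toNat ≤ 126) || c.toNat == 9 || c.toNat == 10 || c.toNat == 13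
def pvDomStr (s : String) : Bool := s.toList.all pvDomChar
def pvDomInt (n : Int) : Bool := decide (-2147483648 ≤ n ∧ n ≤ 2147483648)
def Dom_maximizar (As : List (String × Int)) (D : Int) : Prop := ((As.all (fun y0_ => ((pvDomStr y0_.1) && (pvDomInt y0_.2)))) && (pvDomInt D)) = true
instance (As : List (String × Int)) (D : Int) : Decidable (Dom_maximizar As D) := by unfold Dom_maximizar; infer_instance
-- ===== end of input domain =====

-- B replaces A's running-accumulator-with-break loop by a prefix-sum table, a first-index-reaching-D search, and a slice (alternative decomposition, same cost).


-- ===== PORT A =====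
-- greedy loop of A: append while size+current < D, else break
def pvLoopA (D : Int) : List (String × Int) → Int → List (String × Int)
  | [], _ => []
  | f :: rest, cur =>
    if f.2 + cur < D then f :: pvLoopA D rest (cur + f.2) else []

def maximizar (As : List (String × Int)) (D : Int) : List (String × Int) :=
  pvLoopA D (PySem.List.sorted As (fun t => t.2) false) 0

-- ===== PORT B =====
-- B: prefix-sum table of the sorted sizes
def pvPref : List (String × Int) → Int → List Int
  | [], _ => []
  | f :: rest, s => (s + f.2) :: pvPref rest (s + f.2)

-- first index whose prefix sum reaches D (default: length)
def pvFirstGe (D : Int) : List Int → Nat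
  | [] => 0
  | p :: rest => if p ≥ D then 0 else pvFirstGe D rest + 1

def maximizar_alt (As : List (String × Int)) (D : Int) : List (String × Int) :=
  let srt := PySem.List.sorted As (fun t => t.2) false
  srt.take (pvFirstGe D (pvPref srt 0))

-- ===== PRECONDITION & SPEC =====
def Spec_maximizar (As : List (String × Int)) (D : Int) (out : List (String × Int)) : Prop := out = maximizar_alt As D
instance (As : List (String × Int)) (D : Int) (out : List (String × Int)) : Decidable (Spec_maximizar As D out) := by unfold Spec_maximizar; infer_instance

-- ===== CLAIM (what is proved, stated in full; the proofs are below) =====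
def Claim_equal_maximizar : Prop := ∀ (As : List (String × Int)) (D : Int), Dom_maximizar As D → Spec_maximizar As D (maximizar As D)

-- ===== LEMMAS AND PROOFS =====

-- ===== VERDICT (by name: the statement is the Claim_ definition above) =====
theorem pvLoop_take (D : Int) (xs : List (String × Int)) :
    ∀ cur, pvLoopA D xs cur = xs.take (pvFirstGe D (pvPref xs cur)) := by
  induction xs with
  | nil => intro cur; rfl
  | cons f rest ih =>
    intro cur
    simp only [pvLoopA, pvPref, pvFirstGe]
    by_cases h : f.2 + cur < D
    · have h' : ¬ (cur + f.2 ≥ D) := by omega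
      simp [h', ih, Int.add_comm]
    · have h' : cur + f.2 ≥ D := by omega
      simp [h, h']

theorem maximizar_spec : Claim_equal_maximizar := by
  intro As D _
  unfold Spec_maximizar maximizar maximizar_alt
  exact pvLoop_take D _ 0
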